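-- pv_equiv track=rewrite | github.com/haroon12h08/labs-hybrid-optimization | labs_optimizer/core.py | hill_climb_deterministic
-- ===== SOURCE A (Python) =====
-- def labs_cost(sequence):
--     """
--     Computes the Energy/Cost for a Low Autocorrelation Binary Sequence (LABS).
--
--     The cost is defined as the sum of squared periodic autocorrelations
--     for all non-zero shifts k.
--
--     Formally:
--         C_k = sum_{i=0}^{N-k-1} s[i] * s[i+k]
--         Cost = sum_{k=1}^{N-1} (C_k)^2
--
--     Args:
--         sequence: A list or 1D array of integers, restricted to {-1, +1}.
--
--     Returns:
--         The integer cost (energy) of the sequence.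
--     """
--     N = len(sequence)
--     total_cost = 0
--
--     # Allow compatibility with both Python lists and NumPy arrays
--     # Explicit loop implementation for clarity as requested
--
--     # Iterate through each shift k from 1 to N-1
--     for k in range(1, N):
--         c_k = 0
--
--         # Compute autocorrelation for shift k
--         # Sum s[i] * s[i+k] for valid overlaps
--         for i in range(N - k):
--             c_k += sequence[i] * sequence[i + k]
--
--         # Add square of the autocorrelation to total cost
--         total_cost += c_k ** 2
--
--     return total_cost
--
-- def hill_climb_deterministic(sequence):
--     """
--     Performs a deterministic hill-climbing optimization on the given LABS sequence.
--
--     Algorithm: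
--     1. Start with the input sequence.
--     2. Iterate through each bit position.
--     3. Flip the bit and check if the cost strictly decreases.
--     4. If cost decreases, keep the flip.
--     5. Repeat until a full pass over the sequence results in no changes.
--
--     Args:
--         sequence: A list of integers {-1, 1}.
--
--     Returns:
--         A tuple (optimized_sequence, final_cost).
--     """
--     # Work on a copy to avoid side effects on the input object
--     current_seq = list(sequence)
--     current_cost = labs_cost(current_seq)
--     N = len(current_seq)
--
--     # Loop until no improvement is found in a full pass
--     while True:
--         improved = False
--
--         # Iterate over every bit
--         for i in range(N):
--             # 1. Flip the bit
--             current_seq[i] *= -1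
--
--             # 2. Compute new cost
--             new_cost = labs_cost(current_seq)
--
--             # 3. Check for strict improvement
--             if new_cost < current_cost:
--                 current_cost = new_cost
--                 improved = True
--                 # Keep the change
--             else:
--                 # Revert the flip
--                 current_seq[i] *= -1
--
--         # If we went through the whole sequence without a single improvement, stop.
--         if not improved:
--             break
--
--     return current_seq, current_cost
-- ===== SOURCE B (Python) =====
-- def hill_climb_deterministic(sequence):
--     """Same deterministic hill climbing, but maintains the autocorrelation
--     vector C_k and evaluates each candidate flip incrementally in O(N)
--     instead of recomputing the full O(N^2) LABS cost for every flip."""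
--     seq = list(sequence)
--     N = len(seq)
--     # Initial autocorrelations C_k for k = 1 .. N-1, and cost = sum of squares.
--     C = [sum(seq[j] * seq[j + k] for j in range(N - k)) for k in range(1, N)]
--     cost = 0
--     for d in C:
--         cost += d * d
--     while True:
--         improved = False
--         for i in range(N):
--             s_i = seq[i]
--             # Flipping seq[i] changes C_k by -2*s_i*seq[i+k] and -2*s_i*seq[i-k]
--             # (each term only when that neighbour exists).
--             new_C = [delta_after_flip(seq, C, N, i, s_i, k) for k in range(1, N)]
--             new_cost = 0
--             for d in new_C:
--                 new_cost += d * d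
--             if new_cost < cost:
--                 seq[i] = -s_i
--                 C = new_C
--                 cost = new_cost
--                 improved = True
--         if not improved:
--             break
--     return seq, cost
--
--
-- def delta_after_flip(seq, C, N, i, s_i, k):
--     """New value of C_k after flipping seq[i] (whose current value is s_i)."""
--     d = C[k - 1]
--     if i + k < N:
--         d -= 2 * s_i * seq[i + k]
--     if k <= i:
--         d -= 2 * s_i * seq[i - k]
--     return d
-- ===== Notes on version B (the rewrite author's own statement) =====
-- stated objective: faster
-- what changed: Instead of recomputing the full O(N^2) LABS cost for every candidate bit flip, B maintains the autocorrelation vector C_k and computes each flip's new cost incrementally in O(N), making a pass O(N^2) instead of O(N^3).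
import Mathlib
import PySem

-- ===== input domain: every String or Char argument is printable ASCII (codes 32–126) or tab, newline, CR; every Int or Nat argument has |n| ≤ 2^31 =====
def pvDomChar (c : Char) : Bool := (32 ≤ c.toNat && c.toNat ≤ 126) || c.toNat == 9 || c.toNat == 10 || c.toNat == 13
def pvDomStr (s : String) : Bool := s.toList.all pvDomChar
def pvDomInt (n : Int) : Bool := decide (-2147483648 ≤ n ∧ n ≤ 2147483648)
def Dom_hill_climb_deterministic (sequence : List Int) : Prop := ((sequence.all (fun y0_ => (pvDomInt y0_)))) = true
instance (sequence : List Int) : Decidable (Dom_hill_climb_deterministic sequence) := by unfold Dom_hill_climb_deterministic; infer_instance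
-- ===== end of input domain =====

-- B replaces A's full O(N^2) cost recomputation per candidate flip by an incrementally
-- maintained autocorrelation vector with an O(N) per-flip update (objective: faster).
-- Neither program mutates its argument (A copies the input first).

-- ===== PORT A =====
-- Indexing note: every list index below is a loop variable proven in range (0 ≤ i < len),
-- so Python's seq[i] is ported exactly as List.getD i 0 and seq[i] = v as List.set i v.

def labs_cost (sequence : List Int) : Int :=
  let N := sequence.length
  (List.range' 1 (N - 1)).foldl (fun total_cost k =>
    let c_k := (List.range (N - k)).foldl
      (fun c i => c + sequence.getD i 0 * sequence.getD (i + k) 0) 0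
    total_cost + c_k ^ 2) 0

-- body of A's `for i in range(N)` pass; state = (current_seq, current_cost, improved)
def hc_step (st : List Int × Int × Bool) (i : Nat) : List Int × Int × Bool :=
  let s1 := st.1.set i (st.1.getD i 0 * (-1))            -- current_seq[i] *= -1
  let new_cost := labs_cost s1
  if new_cost < st.2.1 then (s1, new_cost, true)
  else (s1.set i (s1.getD i 0 * (-1)), st.2.1, st.2.2)   -- revert the flip

-- A's `while True` loop.  The fuel (initial cost + 1) is a totality guard only: the cost
-- is a nonnegative integer that strictly decreases on every pass that sets `improved`,
-- so at most cost+1 passes can ever run and the guard never changes the result.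
def hc_loop : Nat → Nat → List Int → Int → List Int × Int
  | 0, _, s, c => (s, c)
  | fuel + 1, N, s, c =>
    let r := (List.range N).foldl hc_step (s, c, false)
    if r.2.2 then hc_loop fuel N r.1 r.2.1 else (r.1, r.2.1)

def hill_climb_deterministic (sequence : List Int) : List Int × Int :=
  let current_cost := labs_cost sequence
  hc_loop (current_cost.toNat + 1) sequence.length sequence current_cost

-- ===== PORT B =====
-- (same indexing note as port A: all indices are in range where they are used)

def delta_after_flip (seq C : List Int) (N i : Nat) (s_i : Int) (k : Nat) : Int :=
  let d0 := C.getD (k - 1) 0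
  let d1 := if i + k < N then d0 - 2 * s_i * seq.getD (i + k) 0 else d0
  if k ≤ i then d1 - 2 * s_i * seq.getD (i - k) 0 else d1

-- the initial autocorrelation vector  C = [C_1, …, C_{N-1}]
def alt_corrs (seq : List Int) (N : Nat) : List Int :=
  (List.range' 1 (N - 1)).map (fun k =>
    ((List.range (N - k)).map (fun j => seq.getD j 0 * seq.getD (j + k) 0)).sum)

-- `cost = 0; for d in C: cost += d*d`
def sum_sq (C : List Int) : Int := C.foldl (fun cost d => cost + d * d) 0

-- body of B's `for i in range(N)` pass; state = (seq, C, cost, improved)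
def hc_alt_step (N : Nat) (st : List Int × List Int × Int × Bool) (i : Nat) :
    List Int × List Int × Int × Bool :=
  let s_i := st.1.getD i 0
  let newC := (List.range' 1 (N - 1)).map (fun k => delta_after_flip st.1 st.2.1 N i s_i k)
  let new_cost := sum_sq newC
  if new_cost < st.2.2.1 then (st.1.set i (-s_i), newC, new_cost, true) else st

-- B's `while True` loop, with the same cost+1 totality fuel as port A
def hc_alt_loop : Nat → Nat → List Int → List Int → Int → List Int × Int
  | 0, _, s, _, c => (s, c)
  | fuel + 1, N, s, C, c =>
    let r := (List.range N).foldl (hc_alt_step N) (s, C, c, false)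
    if r.2.2.2 then hc_alt_loop fuel N r.1 r.2.1 r.2.2.1 else (r.1, r.2.2.1)

def hill_climb_deterministic_alt (sequence : List Int) : List Int × Int :=
  let N := sequence.length
  let C := alt_corrs sequence N
  let cost := sum_sq C
  hc_alt_loop (cost.toNat + 1) N sequence C cost

-- ===== PRECONDITION & SPEC =====
def Spec_hill_climb_deterministic (sequence : List Int) (out : List Int × Int) : Prop := out = hill_climb_deterministic_alt sequence
instance (sequence : List Int) (out : List Int × Int) : Decidable (Spec_hill_climb_deterministic sequence out) := by unfold Spec_hill_climb_deterministic; infer_instance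

-- ===== CLAIM (what is proved, stated in full; the proofs are below) =====
def Claim_equal_hill_climb_deterministic : Prop := ∀ (sequence : List Int), Dom_hill_climb_deterministic sequence → Spec_hill_climb_deterministic sequence (hill_climb_deterministic sequence)

-- ===== LEMMAS AND PROOFS =====

-- the autocorrelation C_k of a sequence, as a mathematical sum
def corr (s : List Int) (k : Nat) : Int :=
  ∑ j ∈ Finset.range (s.length - k), s.getD j 0 * s.getD (j + k) 0

lemma getD_set_ite (l : List Int) (i j : Nat) (a : Int) (hi : i < l.length) :
    (l.set i a).getD j 0 = if j = i then a else l.getD j 0 := by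
  simp only [List.getD_eq_getElem?_getD, List.getElem?_set]
  rcases Nat.decEq i j with h | h <;> simp_all [eq_comm]

lemma set_getD_self (l : List Int) (i : Nat) (h : i < l.length) :
    l.set i (l.getD i 0) = l := by
  simp [List.getD_eq_getElem?_getD, List.getElem?_eq_getElem h]

lemma labs_cost_eq (s : List Int) :
    labs_cost s = ((List.range' 1 (s.length - 1)).map (fun k => corr s k ^ 2)).sum := by
  show (List.range' 1 (s.length - 1)).foldl (fun total_cost k =>
      total_cost + ((List.range (s.length - k)).foldl
        (fun c i => c + s.getD i 0 * s.getD (i + k) 0) 0) ^ 2) 0 = _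
  rw [PySem.List.foldl_add, zero_add]
  congr 1
  apply List.map_congr_left
  intro k _
  rw [PySem.List.foldl_add _ (fun i => s.getD i 0 * s.getD (i + k) 0) 0, zero_add]
  rfl

lemma sum_sq_eq (C : List Int) : sum_sq C = (C.map (fun d => d * d)).sum := by
  show C.foldl (fun cost d => cost + d * d) 0 = _
  rw [PySem.List.foldl_add _ (fun d => d * d) 0, zero_add]

lemma sum_sq_corrs (s : List Int) :
    sum_sq ((List.range' 1 (s.length - 1)).map (fun k => corr s k)) = labs_cost s := by
  rw [sum_sq_eq, labs_cost_eq, List.map_map]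
  congr 1
  apply List.map_congr_left
  intro k _
  simp [Function.comp, pow_two]

lemma alt_corrs_eq (s : List Int) :
    alt_corrs s s.length = (List.range' 1 (s.length - 1)).map (fun k => corr s k) := rfl

lemma corr_flip (s : List Int) (i k : Nat) (hi : i < s.length) (hk : 1 ≤ k) :
    corr (s.set i (-(s.getD i 0))) k =
      corr s k
      + (if i + k < s.length then -(2 * s.getD i 0 * s.getD (i + k) 0) else 0)
      + (if k ≤ i then -(2 * s.getD i 0 * s.getD (i - k) 0) else 0) := by
  have hlen : (s.set i (-(s.getD i 0))).length = s.length := by simp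
  unfold corr
  rw [hlen]
  have key : ∀ j ∈ Finset.range (s.length - k),
      (s.set i (-(s.getD i 0))).getD j 0 * (s.set i (-(s.getD i 0))).getD (j + k) 0
        = s.getD j 0 * s.getD (j + k) 0
          + ((if j = i then -(2 * s.getD i 0 * s.getD (i + k) 0) else 0)
           + (if k ≤ i ∧ j = i - k then -(2 * s.getD i 0 * s.getD (i - k) 0) else 0)) := by
    intro j hj
    rw [Finset.mem_range] at hj
    rw [getD_set_ite s i j (-(s.getD i 0)) hi, getD_set_ite s i (j + k) (-(s.getD i 0)) hi]
    by_cases h1 : j = i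
    · have h2 : ¬ (j + k = i) := by omega
      have h3 : ¬ (k ≤ i ∧ j = i - k) := by omega
      rw [if_pos h1, if_neg h2, if_pos h1, if_neg h3, h1]
      ring
    · by_cases h2 : j + k = i
      · have hki : k ≤ i := by omega
        have hj2 : j = i - k := by omega
        rw [if_neg h1, if_pos h2, if_neg h1, if_pos ⟨hki, hj2⟩, h2, ← hj2]
        ring
      · have h3 : ¬ (k ≤ i ∧ j = i - k) := by omega
        rw [if_neg h1, if_neg h2, if_neg h1, if_neg h3]
        ring
  rw [Finset.sum_congr rfl key, Finset.sum_add_distrib, Finset.sum_add_distrib, ← add_assoc]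
  congr 1
  congr 1
  · rw [Finset.sum_ite_eq' (Finset.range (s.length - k)) i
        (fun _ => -(2 * s.getD i 0 * s.getD (i + k) 0))]
    by_cases hc : i + k < s.length
    · rw [if_pos (Finset.mem_range.mpr (by omega)), if_pos hc]
    · rw [if_neg (by rw [Finset.mem_range]; omega), if_neg hc]
  · by_cases hki : k ≤ i
    · rw [if_pos hki]
      have hcollapse : ∀ j ∈ Finset.range (s.length - k),
          (if k ≤ i ∧ j = i - k then -(2 * s.getD i 0 * s.getD (i - k) 0) else 0)
            = (if j = i - k then -(2 * s.getD i 0 * s.getD (i - k) 0) else 0) := by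
        intro j _
        by_cases hj : j = i - k
        · rw [if_pos ⟨hki, hj⟩, if_pos hj]
        · rw [if_neg (fun h => hj h.2), if_neg hj]
      rw [Finset.sum_congr rfl hcollapse,
        Finset.sum_ite_eq' (Finset.range (s.length - k)) (i - k)
          (fun _ => -(2 * s.getD i 0 * s.getD (i - k) 0)),
        if_pos (Finset.mem_range.mpr (by omega))]
    · rw [if_neg hki]
      apply Finset.sum_eq_zero
      intro j _
      rw [if_neg (fun h => hki h.1)]

lemma delta_eq (s : List Int) (i k : Nat) (hi : i < s.length) (hk1 : 1 ≤ k) (hk2 : k < s.length) :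
    delta_after_flip s ((List.range' 1 (s.length - 1)).map (fun k => corr s k)) s.length i (s.getD i 0) k
      = corr (s.set i (-(s.getD i 0))) k := by
  have hC : ((List.range' 1 (s.length - 1)).map (fun k => corr s k)).getD (k - 1) 0 = corr s k := by
    have hlt : k - 1 < ((List.range' 1 (s.length - 1)).map (fun k => corr s k)).length := by
      simp [List.length_range']; omega
    rw [List.getD_eq_getElem _ _ hlt, List.getElem_map, List.getElem_range']
    congr 1
    omega
  rw [corr_flip s i k hi hk1]
  simp only [delta_after_flip, hC]
  split_ifs <;> ring

-- the simulation relation between A's pass state and B's pass state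
def rel (N : Nat) (a : List Int × Int × Bool) (b : List Int × List Int × Int × Bool) : Prop :=
  b.1 = a.1 ∧ b.2.1 = (List.range' 1 (N - 1)).map (fun k => corr a.1 k) ∧
    b.2.2.1 = a.2.1 ∧ b.2.2.2 = a.2.2 ∧ a.1.length = N

lemma step_equiv (N : Nat) (a : List Int × Int × Bool) (b : List Int × List Int × Int × Bool)
    (i : Nat) (hiN : i < N) (h : rel N a b) :
    rel N (hc_step a i) (hc_alt_step N b i) := by
  obtain ⟨s, c, imp⟩ := a
  obtain ⟨bs, bC, bc, bimp⟩ := b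
  obtain ⟨h1, h2, h3, h4, h5⟩ := h
  simp only at h1 h2 h3 h4 h5
  subst h5
  rw [show ((bs, bC, bc, bimp) : List Int × List Int × Int × Bool)
        = (s, (List.range' 1 (s.length - 1)).map (fun k => corr s k), c, imp) from by
      rw [h1, h2, h3, h4]]
  have hi : i < s.length := hiN
  have hflip : s.set i (s.getD i 0 * (-1)) = s.set i (-(s.getD i 0)) := by
    rw [mul_neg_one]
  have hlen' : (s.set i (-(s.getD i 0))).length = s.length := by simp
  have hnewC : (List.range' 1 (s.length - 1)).map
        (fun k => delta_after_flip s ((List.range' 1 (s.length - 1)).map (fun k => corr s k))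
          s.length i (s.getD i 0) k)
      = (List.range' 1 (s.length - 1)).map (fun k => corr (s.set i (-(s.getD i 0))) k) := by
    apply List.map_congr_left
    intro k hk
    rw [List.mem_range'_1] at hk
    exact delta_eq s i k hi hk.1 (by omega)
  have hcost : sum_sq ((List.range' 1 (s.length - 1)).map (fun k => corr (s.set i (-(s.getD i 0))) k))
      = labs_cost (s.set i (-(s.getD i 0))) := by
    have := sum_sq_corrs (s.set i (-(s.getD i 0)))
    rwa [hlen'] at this
  unfold hc_step hc_alt_step rel
  dsimp only
  rw [hflip, hnewC, hcost]
  by_cases hcond : labs_cost (s.set i (-(s.getD i 0))) < c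
  · rw [if_pos hcond, if_pos hcond]
    exact ⟨rfl, rfl, rfl, rfl, hlen'⟩
  · rw [if_neg hcond, if_neg hcond]
    have hback : (s.set i (-(s.getD i 0))).set i ((s.set i (-(s.getD i 0))).getD i 0 * (-1)) = s := by
      rw [getD_set_ite s i i (-(s.getD i 0)) hi, if_pos rfl, List.set_set]
      have hv : -(s.getD i 0) * (-1) = s.getD i 0 := by ring
      rw [hv, set_getD_self s i hi]
    rw [hback]
    exact ⟨rfl, rfl, rfl, rfl, rfl⟩

lemma fold_equiv (l : List Nat) (N : Nat) (hl : ∀ i ∈ l, i < N)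
    (a : List Int × Int × Bool) (b : List Int × List Int × Int × Bool) (h : rel N a b) :
    rel N (l.foldl hc_step a) (l.foldl (hc_alt_step N) b) := by
  induction l generalizing a b with
  | nil => exact h
  | cons x t ih =>
      exact ih (fun i hi => hl i (List.mem_cons_of_mem _ hi)) _ _
        (step_equiv N a b x (hl x (List.mem_cons_self)) h)

lemma loop_equiv (fuel N : Nat) (s C : List Int) (c : Int)
    (hs : s.length = N) (hC : C = (List.range' 1 (N - 1)).map (fun k => corr s k)) :
    hc_alt_loop fuel N s C c = hc_loop fuel N s c := by
  induction fuel generalizing s C c with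
  | zero => rfl
  | succ n ih =>
      show (let r := (List.range N).foldl (hc_alt_step N) (s, C, c, false)
            if r.2.2.2 then hc_alt_loop n N r.1 r.2.1 r.2.2.1 else (r.1, r.2.2.1))
          = (let r := (List.range N).foldl hc_step (s, c, false)
            if r.2.2 then hc_loop n N r.1 r.2.1 else (r.1, r.2.1))
      obtain ⟨e1, e2, e3, e4, e5⟩ := fold_equiv (List.range N) N
        (fun i hi => List.mem_range.mp hi) (s, c, false) (s, C, c, false)
        ⟨rfl, by rw [hC], rfl, rfl, hs⟩
      simp only
      rw [e4]
      by_cases himp : ((List.range N).foldl hc_step (s, c, false)).2.2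
      · rw [if_pos himp, if_pos himp, e1, e3]
        exact ih _ _ _ e5 e2
      · rw [if_neg himp, if_neg himp, e1, e3]

-- ===== VERDICT (by name: the statement is the Claim_ definition above) =====
theorem hill_climb_deterministic_spec : Claim_equal_hill_climb_deterministic := by
  intro s _
  show hill_climb_deterministic s = hill_climb_deterministic_alt s
  have h1 : hill_climb_deterministic s
      = hc_loop ((labs_cost s).toNat + 1) s.length s (labs_cost s) := rfl
  have h2 : hill_climb_deterministic_alt s
      = hc_alt_loop ((sum_sq (alt_corrs s s.length)).toNat + 1) s.length s
          (alt_corrs s s.length) (sum_sq (alt_corrs s s.length)) := rfl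
  rw [h1, h2, alt_corrs_eq, sum_sq_corrs]
  exact (loop_equiv _ _ _ _ _ rfl (alt_corrs_eq s)).symm
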